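-- pv_equiv track=rewrite | github.com/junhyukM/algorithm_python | 프로그래머스/0/120899. 가장 큰 수 찾기/가장 큰 수 찾기.py | solution
-- ===== SOURCE A (Python) =====
-- def solution(array):
--     answer = []
--     # 리스트에서 가장 큰 값 찾기
--     max_value = max(array)
--     # 큰 값의 인덱스 찾기
--     for idx, i in enumerate(array):
--         if i == max_value:
--             answer_index = idx
--     answer = [max_value, answer_index]
--
--     return answer
-- ===== SOURCE B (Python) =====
-- def solution(array):
--     # single pass: track the running max and its last index (>= keeps the last one)
--     m, mi = array[0], 0
--     for idx, x in enumerate(array):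
--         if x >= m:
--             m, mi = x, idx
--     return [m, mi]
-- ===== Notes on version B (the rewrite author's own statement) =====
-- stated objective: simpler
-- what changed: Replaces A's two passes (max() then a full scan recording the index of each match) by one pass that tracks the running maximum and its last index, updating on >=.
import Mathlib
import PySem

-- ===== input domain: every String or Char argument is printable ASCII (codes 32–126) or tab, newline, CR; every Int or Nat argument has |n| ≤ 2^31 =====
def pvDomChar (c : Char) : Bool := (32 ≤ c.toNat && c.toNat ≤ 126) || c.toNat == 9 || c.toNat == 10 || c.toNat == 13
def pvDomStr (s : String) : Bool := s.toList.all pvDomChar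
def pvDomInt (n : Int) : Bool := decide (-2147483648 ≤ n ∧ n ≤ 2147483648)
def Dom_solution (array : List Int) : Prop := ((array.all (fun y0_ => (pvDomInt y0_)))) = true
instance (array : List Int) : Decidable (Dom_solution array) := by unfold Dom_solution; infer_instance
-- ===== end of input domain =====

-- B: one pass tracking the running max and its last index, instead of A's max() pass plus index-scan pass (objective: simpler).

-- ===== PORT A =====
def solution (array : List Int) : List Int :=
  -- max_value = max(array); ValueError on [] is excluded by Pre_solution (the none branch is unreachable there)
  match PySem.List.max? array (fun x => x) with
  | none => []
  | some max_value =>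
    -- for idx, i in enumerate(array): if i == max_value: answer_index = idx
    -- init 0 stands for the unassigned 'answer_index'; the NameError path is unreachable since max_value ∈ array
    let answer_index := (PySem.List.enumerate array 0).foldl
      (fun acc p => if p.2 == max_value then p.1 else acc) 0
    [max_value, answer_index]

-- ===== PORT B =====
def solution_alt (array : List Int) : List Int :=
  match array with
  | [] => []  -- array[0] raises IndexError; excluded by Pre_solution
  | a :: _ =>
    let s := (PySem.List.enumerate array 0).foldl
      (fun (s : Int × Int) p => if p.2 ≥ s.1 then (p.2, p.1) else s) (a, 0)
    [s.1, s.2]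

-- ===== PRECONDITION & SPEC =====
-- Pre_ excludes only the empty list, on which A raises ValueError (max of empty sequence).
def Pre_solution (array : List Int) : Prop := array ≠ []
instance (array : List Int) : Decidable (Pre_solution array) := by unfold Pre_solution; infer_instance
def pvWitness_solution : List Int := ([3, 1, 3])

def Spec_solution (array : List Int) (out : List Int) : Prop := out = solution_alt array
instance (array : List Int) (out : List Int) : Decidable (Spec_solution array out) := by unfold Spec_solution; infer_instance

-- ===== CLAIM (what is proved, stated in full; the proofs are below) =====
def Claim_equal_solution : Prop := ∀ (array : List Int), Dom_solution array → Pre_solution array → Spec_solution array (solution array)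

-- ===== LEMMAS AND PROOFS =====

-- running max of the second components
def pvMaxOf (l : List (Int × Int)) (m : Int) : Int := l.foldl (fun a p => max a p.2) m

lemma pvMaxOf_cons (p : Int × Int) (t : List (Int × Int)) (m : Int) :
    pvMaxOf (p :: t) m = pvMaxOf t (max m p.2) := rfl

lemma pvMaxOf_le (l : List (Int × Int)) (m : Int) : m ≤ pvMaxOf l m := by
  induction l generalizing m with
  | nil => simp [pvMaxOf]
  | cons p t ih =>
    rw [pvMaxOf_cons]
    exact le_trans (le_max_left m p.2) (ih (max m p.2))

lemma pvMaxOf_mem (l : List (Int × Int)) (m : Int) :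
    pvMaxOf l m = m ∨ ∃ p ∈ l, pvMaxOf l m = p.2 := by
  induction l generalizing m with
  | nil => simp [pvMaxOf]
  | cons p t ih =>
    rw [pvMaxOf_cons]
    rcases ih (max m p.2) with h | ⟨q, hq, hval⟩
    · by_cases hle : p.2 ≤ m
      · left; rw [h, max_eq_left hle]
      · right; exact ⟨p, List.mem_cons_self .., by rw [h, max_eq_right (by omega)]⟩
    · right; exact ⟨q, List.mem_cons_of_mem _ hq, hval⟩

-- A's index scan
def pvScanA (l : List (Int × Int)) (M : Int) (j : Int) : Int :=
  l.foldl (fun acc p => if p.2 == M then p.1 else acc) j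

lemma pvScanA_cons (p : Int × Int) (t : List (Int × Int)) (M j : Int) :
    pvScanA (p :: t) M j = pvScanA t M (if p.2 == M then p.1 else j) := rfl

lemma pvScanA_init_irrel (l : List (Int × Int)) (M : Int) (j₁ j₂ : Int)
    (h : ∃ p ∈ l, M = p.2) : pvScanA l M j₁ = pvScanA l M j₂ := by
  induction l generalizing j₁ j₂ with
  | nil => simp at h
  | cons p t ih =>
    rw [pvScanA_cons, pvScanA_cons]
    by_cases hp : p.2 == M
    · simp [hp]
    · simp only [hp, Bool.false_eq_true, if_false]
      rcases h with ⟨q, hq, hM⟩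
      rcases List.mem_cons.mp hq with rfl | hmem
      · exact absurd (beq_iff_eq.mpr hM.symm) (by simpa using hp)
      · exact ih j₁ j₂ ⟨q, hmem, hM⟩

-- main invariant: the one-pass fold equals (overall max, A's last-index scan)
lemma pvFold_eq (l : List (Int × Int)) (m j : Int) :
    l.foldl (fun (s : Int × Int) p => if p.2 ≥ s.1 then (p.2, p.1) else s) (m, j)
      = (pvMaxOf l m, pvScanA l (pvMaxOf l m) j) := by
  induction l generalizing m j with
  | nil => simp [pvMaxOf, pvScanA]
  | cons p t ih =>
    rw [List.foldl_cons, pvMaxOf_cons, pvScanA_cons]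
    by_cases hge : p.2 ≥ m
    · rw [if_pos hge, ih p.2 p.1, max_eq_right hge]
      by_cases heq : p.2 == pvMaxOf t p.2
      · simp [heq]
      · rw [if_neg (by simpa using heq)]
        have hlt : p.2 < pvMaxOf t p.2 :=
          lt_of_le_of_ne (pvMaxOf_le t p.2) (by simpa using heq)
        have hmem : ∃ q ∈ t, pvMaxOf t p.2 = q.2 := by
          rcases pvMaxOf_mem t p.2 with h | h
          · omega
          · exact h
        exact congrArg _ (pvScanA_init_irrel t _ p.1 j hmem)
    · rw [if_neg hge, ih m j, max_eq_left (by omega)]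
      have hne : ¬ (p.2 == pvMaxOf t m) := by
        have := pvMaxOf_le t m
        simp only [beq_iff_eq]; omega
      rw [if_neg hne]

-- a fold over enumerate that only looks at the values is a fold over the values
lemma pvMaxOf_enumerate (xs : List Int) (s : Int) (m : Int) :
    pvMaxOf (PySem.List.enumerate xs s) m = xs.foldl max m := by
  induction xs generalizing s m with
  | nil => simp [pvMaxOf, PySem.List.enumerate_nil]
  | cons x t ih =>
    simp only [PySem.List.enumerate_cons, pvMaxOf, List.foldl_cons] at *
    exact ih (s + 1) (max m x)

-- ===== VERDICT (by name: the statement is the Claim_ definition above) =====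
theorem solution_spec : Claim_equal_solution := by
  intro array _ hpre
  unfold Spec_solution
  match array with
  | [] => exact absurd rfl hpre
  | a :: t =>
    simp only [solution, solution_alt, PySem.List.max?_id_cons]
    rw [pvFold_eq]
    have hmax : pvMaxOf (PySem.List.enumerate (a :: t) 0) a = t.foldl max a := by
      rw [pvMaxOf_enumerate]
      simp [max_self]
    rw [hmax]
    rfl
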